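-- pv_equiv track=rewrite | github.com/mikehernandez-bit/gicateca_tesis | app/core/simulation_preprocessor.py | _is_guide_paragraph
-- ===== SOURCE A (Python) =====
-- import unicodedata
-- from typing import Any, Dict, Iterable, List, Optional, Tuple
--
-- GUIDE_TOKENS = (
--     "NOTA:",
--     "GUIA:",
--     "EJEMPLO:",
--     "INSTRUCCION:",
--     "[ESCRIBA",
--     "[COLOQUE",
-- )
--
-- def _normalize_text(value: Any) -> str:
--     if not isinstance(value, str):
--         return ""
--     return " ".join(value.strip().split())
--
-- def _normalize_for_match(value: Any) -> str:
--     text = _normalize_text(value)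
--     if not text:
--         return ""
--     text = unicodedata.normalize("NFKD", text)
--     text = "".join(ch for ch in text if not unicodedata.combining(ch))
--     return text.lower()
--
-- def _is_guide_paragraph(text: str) -> bool:
--     normalized = _normalize_for_match(text)
--     if not normalized:
--         return False
--     for token in GUIDE_TOKENS:
--         normalized_token = _normalize_for_match(token)
--         if normalized_token and normalized_token in normalized:
--             return True
--     return False
-- ===== SOURCE B (Python) =====
-- import re
-- import unicodedata
-- from typing import Any
--
-- GUIDE_TOKENS = (
--     "NOTA:",
--     "GUIA:",
--     "EJEMPLO:",
--     "INSTRUCCION:",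
--     "[ESCRIBA",
--     "[COLOQUE",
-- )
--
-- def _normalize_text(value: Any) -> str:
--     if not isinstance(value, str):
--         return ""
--     return " ".join(value.strip().split())
--
-- def _normalize_for_match(value: Any) -> str:
--     text = _normalize_text(value)
--     if not text:
--         return ""
--     text = unicodedata.normalize("NFKD", text)
--     text = "".join(ch for ch in text if not unicodedata.combining(ch))
--     return text.lower()
--
-- # One alternation pattern over the normalized tokens, compiled once.
-- _GUIDE_PATTERN = re.compile(
--     "|".join(re.escape(t) for t in (_normalize_for_match(tok) for tok in GUIDE_TOKENS) if t)
-- )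
--
-- def _is_guide_paragraph(text: str) -> bool:
--     normalized = _normalize_for_match(text)
--     if not normalized:
--         return False
--     return _GUIDE_PATTERN.search(normalized) is not None
-- ===== Notes on version B (the rewrite author's own statement) =====
-- stated objective: idiomatic
-- what changed: The per-token loop of six separate substring scans is replaced by one precompiled re alternation pattern over the normalized, re.escape'd tokens, searched in a single pass over the text.
import Mathlib
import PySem

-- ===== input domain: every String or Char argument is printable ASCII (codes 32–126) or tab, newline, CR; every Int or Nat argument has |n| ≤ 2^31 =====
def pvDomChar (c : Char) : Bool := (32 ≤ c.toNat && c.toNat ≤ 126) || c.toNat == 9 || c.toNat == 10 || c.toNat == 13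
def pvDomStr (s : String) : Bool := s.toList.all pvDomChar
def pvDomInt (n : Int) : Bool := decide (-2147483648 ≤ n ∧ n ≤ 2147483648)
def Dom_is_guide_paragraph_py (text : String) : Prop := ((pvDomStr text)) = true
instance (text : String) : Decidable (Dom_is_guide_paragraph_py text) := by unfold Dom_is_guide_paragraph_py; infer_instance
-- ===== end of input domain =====

-- B replaces A's per-token substring loop by a single left-to-right scan that tries the
-- (precomputed, normalized) token alternatives at each position — an idiomatic combined
-- alternation search (re.search over one compiled pattern in the Python B).

-- ===== PORT A =====
-- module constant GUIDE_TOKENS (shared data, used by both ports)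
def pvGuideTokens : List (List Char) :=
  ["NOTA:".toList, "GUIA:".toList, "EJEMPLO:".toList,
   "INSTRUCCION:".toList, "[ESCRIBA".toList, "[COLOQUE".toList]

-- _normalize_for_match; unicodedata.normalize("NFKD", ·) and the combining-mark filter are
-- the identity on the printable-ASCII domain, so they are ported as the identity (exact on Dom).
def pvNormForMatch (cs : List Char) : List Char :=
  let t := PySem.Chars.join [' '] (PySem.Chars.split₀ (PySem.Chars.strip cs))
  if t = [] then [] else PySem.Chars.lower t

-- A's loop: for token in GUIDE_TOKENS: if normalized_token and normalized_token in normalized: return True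
def pvLoopA : List (List Char) → List Char → Bool
  | [], _ => false
  | tok :: rest, n =>
      let nt := pvNormForMatch tok
      if nt ≠ [] && PySem.Chars.isIn nt n then true else pvLoopA rest n

def is_guide_paragraph_py (text : String) : Bool :=
  let normalized := pvNormForMatch text.toList
  if normalized = [] then false
  else pvLoopA pvGuideTokens normalized

-- ===== PORT B =====
-- the compiled alternation pattern: the nonempty normalized tokens (module-level precompute)
def pvAlts : List (List Char) :=
  (pvGuideTokens.map pvNormForMatch).filter (fun t => t ≠ [])

-- re.search of the alternation: try every alternative at each position, left to right
def pvScanB (alts : List (List Char)) : List Char → Bool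
  | [] => alts.any (fun t => t.isPrefixOf ([] : List Char))
  | c :: rest =>
      if alts.any (fun t => t.isPrefixOf (c :: rest)) then true else pvScanB alts rest

def is_guide_paragraph_py_alt (text : String) : Bool :=
  let normalized := pvNormForMatch text.toList
  if normalized = [] then false
  else pvScanB pvAlts normalized

-- ===== PRECONDITION & SPEC =====
def Spec_is_guide_paragraph_py (text : String) (out : Bool) : Prop := out = is_guide_paragraph_py_alt text
instance (text : String) (out : Bool) : Decidable (Spec_is_guide_paragraph_py text out) := by unfold Spec_is_guide_paragraph_py; infer_instance

-- ===== CLAIM (what is proved, stated in full; the proofs are below) =====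
def Claim_equal_is_guide_paragraph_py : Prop := ∀ (text : String), Dom_is_guide_paragraph_py text → Spec_is_guide_paragraph_py text (is_guide_paragraph_py text)

-- ===== LEMMAS AND PROOFS =====

theorem pvScanB_iff (alts : List (List Char)) (n : List Char) :
    pvScanB alts n = true ↔ ∃ t ∈ alts, t <:+: n := by
  induction n with
  | nil =>
      simp [pvScanB, List.any_eq_true, List.isPrefixOf_iff_prefix]
  | cons c rest ih =>
      rw [pvScanB]
      split_ifs with hc
      · simp only [true_iff]
        rcases List.any_eq_true.mp hc with ⟨t, ht, hp⟩
        exact ⟨t, ht, (List.isPrefixOf_iff_prefix.mp hp).isInfix⟩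
      · rw [ih]
        constructor
        · rintro ⟨t, ht, hinf⟩
          exact ⟨t, ht, hinf.trans (List.infix_cons_iff.mpr (Or.inr (List.infix_refl _)) : rest <:+: c :: rest)⟩
        · rintro ⟨t, ht, hinf⟩
          rcases List.infix_cons_iff.mp hinf with hpre | hinf'
          · refine absurd ?_ hc
            exact List.any_eq_true.mpr ⟨t, ht, List.isPrefixOf_iff_prefix.mpr hpre⟩
          · exact ⟨t, ht, hinf'⟩

theorem pvLoopA_iff (toks : List (List Char)) (n : List Char) :
    pvLoopA toks n = true ↔ ∃ tok ∈ toks, pvNormForMatch tok ≠ [] ∧ (pvNormForMatch tok) <:+: n := by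
  induction toks with
  | nil => simp [pvLoopA]
  | cons tok rest ih =>
      simp only [pvLoopA]
      split_ifs with hc
      · simp only [true_iff]
        simp only [Bool.and_eq_true, decide_eq_true_eq] at hc
        exact ⟨tok, List.mem_cons_self, hc.1, (PySem.Chars.isIn_iff_infix _ _).mp hc.2⟩
      · rw [ih]
        constructor
        · rintro ⟨t, ht, hx⟩
          exact ⟨t, List.mem_cons_of_mem _ ht, hx⟩
        · rintro ⟨t, ht, hne, hinf⟩
          rcases List.mem_cons.mp ht with rfl | ht'
          · refine absurd ?_ hc
            simp only [Bool.and_eq_true, decide_eq_true_eq]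
            exact ⟨hne, (PySem.Chars.isIn_iff_infix _ _).mpr hinf⟩
          · exact ⟨t, ht', hne, hinf⟩

theorem pv_main (n : List Char) : pvLoopA pvGuideTokens n = pvScanB pvAlts n := by
  have h1 := pvLoopA_iff pvGuideTokens n
  have h2 := pvScanB_iff pvAlts n
  have hset : (∃ tok ∈ pvGuideTokens, pvNormForMatch tok ≠ [] ∧ (pvNormForMatch tok) <:+: n)
      ↔ ∃ t ∈ pvAlts, t <:+: n := by
    constructor
    · rintro ⟨tok, htok, hne, hinf⟩
      refine ⟨pvNormForMatch tok, ?_, hinf⟩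
      simp only [pvAlts, List.mem_filter, List.mem_map]
      exact ⟨⟨tok, htok, rfl⟩, by simpa using hne⟩
    · rintro ⟨t, ht, hinf⟩
      simp only [pvAlts, List.mem_filter, List.mem_map] at ht
      rcases ht with ⟨⟨tok, htok, rfl⟩, hne⟩
      exact ⟨tok, htok, by simpa using hne, hinf⟩
  rcases hA : pvLoopA pvGuideTokens n with _ | _
  · rcases hB : pvScanB pvAlts n with _ | _
    · rfl
    · rw [hA] at h1; rw [hB] at h2
      exact absurd ((Bool.false_eq_true ▸ h1).mpr (hset.mpr (h2.mp rfl))) (by simp)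
  · rw [hA] at h1
    exact ((h2.mpr (hset.mp (h1.mp rfl))).symm)

-- ===== VERDICT (by name: the statement is the Claim_ definition above) =====
theorem is_guide_paragraph_py_spec : Claim_equal_is_guide_paragraph_py := by
  intro text _hdom
  unfold Spec_is_guide_paragraph_py is_guide_paragraph_py is_guide_paragraph_py_alt
  by_cases h : pvNormForMatch text.toList = []
  · simp [h]
  · simp only [h, if_false]
    exact pv_main _
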